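-- pv_equiv track=rewrite | github.com/celalalyaprak/data-structures-algorithms-playground | final-project/project.py | format_paris_name
-- ===== SOURCE A (Python) =====
-- def format_paris_name(paris_name):
--     """
--     Convert Paris name format "LASTNAME Firstname" to "Firstname Lastname".
--     Examples:
--       "ALEKSANYAN Artur" -> "Artur Aleksanyan"
--       "McKENZIE Ashley" -> "Ashley McKenzie"
--       "van AERT Wout" -> "Wout van Aert"
--     """
--     if not paris_name or not paris_name.strip():
--         return ""
--
--     parts = paris_name.strip().split()
--     if len(parts) < 2:
--         return paris_name.strip().title()
--
--     def is_lastname_part(part):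
--         uppercase_count = sum(1 for c in part if c.isupper())
--         if uppercase_count >= 2:
--             return True
--         if part.isupper():
--             return True
--         if part.lower() in ['van', 'de', 'el', 'la', 'le', 'del', 'di', 'da', 'dos', 'das']:
--             return True
--         return False
--
--     lastname_parts = []
--     firstname_parts = []
--     found_firstname = False
--
--     for part in parts:
--         if not found_firstname and is_lastname_part(part):
--             if part.lower() in ['van', 'de', 'el', 'la', 'le', 'del', 'di', 'da', 'dos', 'das']:
--                 lastname_parts.append(part.lower())
--             else:
--                 lastname_parts.append(part.title())
--         else:
--             found_firstname = True
--             firstname_parts.append(part)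
--
--     if not firstname_parts:
--         if len(lastname_parts) >= 2:
--             return lastname_parts[-1] + " " + " ".join(lastname_parts[:-1])
--         return paris_name.strip()
--
--     lastname = " ".join(lastname_parts)
--     firstname = " ".join(firstname_parts)
--
--     return firstname + " " + lastname if lastname else firstname
-- ===== SOURCE B (Python) =====
-- PARTICLES = frozenset(['van', 'de', 'el', 'la', 'le', 'del', 'di', 'da', 'dos', 'das'])
--
--
-- def _is_lastname_part(part):
--     uppercase_count = sum(1 for c in part if c.isupper())
--     if uppercase_count >= 2:
--         return True
--     if part.isupper():
--         return True
--     if part.lower() in PARTICLES: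
--         return True
--     return False
--
--
-- def _transform(part):
--     low = part.lower()
--     return low if low in PARTICLES else part.title()
--
--
-- def format_paris_name(paris_name):
--     stripped = paris_name.strip()
--     if not stripped:
--         return ""
--     parts = stripped.split()
--     if len(parts) < 2:
--         return stripped.title()
--
--     def go(rest, ln_rev):
--         # ln_rev: transformed lastname parts accumulated back-to-front
--         if rest and _is_lastname_part(rest[0]):
--             return go(rest[1:], [_transform(rest[0])] + ln_rev)
--         if not rest:  # every part belonged to the last name
--             if len(ln_rev) >= 2:
--                 return ln_rev[0] + " " + " ".join(reversed(ln_rev[1:]))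
--             return stripped
--         firstname = " ".join(rest)
--         if not ln_rev:
--             return firstname
--         return firstname + " " + " ".join(reversed(ln_rev))
--
--     return go(parts, [])
-- ===== Notes on version B (the rewrite author's own statement) =====
-- stated objective: alternative
-- what changed: Replaces A's iterative two-accumulator loop with a latch flag by a recursive descent over the token list that accumulates transformed lastname parts back-to-front (so the all-lastname reordering reads the head instead of a negative index) and assembles the result string directly at the recursion's base cases instead of in A's post-loop branch cascade.
import Mathlib
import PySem

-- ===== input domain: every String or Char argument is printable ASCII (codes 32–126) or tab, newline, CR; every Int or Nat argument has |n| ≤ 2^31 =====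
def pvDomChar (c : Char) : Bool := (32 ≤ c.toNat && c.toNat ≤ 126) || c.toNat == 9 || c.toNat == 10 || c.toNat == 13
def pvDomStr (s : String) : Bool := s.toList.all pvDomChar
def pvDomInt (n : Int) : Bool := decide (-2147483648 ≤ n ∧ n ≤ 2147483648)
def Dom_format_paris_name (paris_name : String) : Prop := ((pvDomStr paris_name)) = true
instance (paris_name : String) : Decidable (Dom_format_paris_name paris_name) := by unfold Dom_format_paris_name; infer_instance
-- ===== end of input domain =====

-- B replaces A's latched two-accumulator loop by a recursive descent that builds the transformed
-- lastname parts back-to-front and assembles the result at the base cases (objective: alternative).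

-- ===== PORT A =====
-- the particle list shared by both Pythons (a module constant in Source B, a literal in Source A)
def pvParticles : List (List Char) :=
  ["van".toList, "de".toList, "el".toList, "la".toList, "le".toList,
   "del".toList, "di".toList, "da".toList, "dos".toList, "das".toList]

-- str.title() for one ASCII chunk: uppercase a letter after a non-letter, lowercase otherwise (exact on ASCII)
def pvTitle (cs : List Char) : List Char :=
  (cs.foldl (fun (st : List Char × Bool) c =>
    (st.1 ++ [if st.2 then PySem.Chars.lowerChar c else PySem.Chars.upperChar c],
     PySem.Chars.isalpha c)) ([], false)).1

-- str.isupper() (exact on ASCII, where the cased characters are exactly the letters)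
def pvStrIsupper (cs : List Char) : Bool :=
  cs.any PySem.Chars.isalpha && cs.all (fun c => !PySem.Chars.islower c)

-- the helper is_lastname_part, identical in Source A and Source B
def pvIsLastnamePart (part : List Char) : Bool :=
  if 2 ≤ part.countP (fun c => PySem.Chars.isupper c) then true
  else if pvStrIsupper part then true
  else if pvParticles.contains (PySem.Chars.lower part) then true
  else false

def format_paris_name (paris_name : String) : String :=
  if paris_name.toList = [] ∨ PySem.Chars.strip paris_name.toList = [] then ""
  else
    let parts := PySem.Chars.split₀ (PySem.Chars.strip paris_name.toList)
    if parts.length < 2 then String.ofList (pvTitle (PySem.Chars.strip paris_name.toList))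
    else
      let st := parts.foldl
        (fun (st : List (List Char) × List (List Char) × Bool) part =>
          if !st.2.2 && pvIsLastnamePart part then
            if pvParticles.contains (PySem.Chars.lower part) then
              (st.1 ++ [PySem.Chars.lower part], st.2.1, st.2.2)
            else
              (st.1 ++ [pvTitle part], st.2.1, st.2.2)
          else (st.1, st.2.1 ++ [part], true)) ([], [], false)
      let lastname_parts := st.1
      let firstname_parts := st.2.1
      if firstname_parts = [] then
        if 2 ≤ lastname_parts.length then
          String.ofList (((PySem.List.pyGet? lastname_parts (-1)).getD []) ++ [' '] ++
            PySem.Chars.join [' '] (PySem.List.slice lastname_parts none (some (-1))))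
        else String.ofList (PySem.Chars.strip paris_name.toList)
      else
        let lastname := PySem.Chars.join [' '] lastname_parts
        let firstname := PySem.Chars.join [' '] firstname_parts
        if lastname = [] then String.ofList firstname
        else String.ofList (firstname ++ [' '] ++ lastname)

-- ===== PORT B =====
-- Source B's _transform helper
def pvTransform (part : List Char) : List Char :=
  let low := PySem.Chars.lower part
  if pvParticles.contains low then low else pvTitle part

-- Source B's recursive go: ln_rev holds the transformed lastname parts back-to-front
def pvGo (stripped : List Char) : List (List Char) → List (List Char) → List Char
  | [], ln_rev =>
      if 2 ≤ ln_rev.length then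
        ln_rev.headD [] ++ [' '] ++ PySem.Chars.join [' '] ((ln_rev.drop 1).reverse)
      else stripped
  | p :: rest', ln_rev =>
      if pvIsLastnamePart p then pvGo stripped rest' (pvTransform p :: ln_rev)
      else
        let firstname := PySem.Chars.join [' '] (p :: rest')
        if ln_rev = [] then firstname
        else firstname ++ [' '] ++ PySem.Chars.join [' '] ln_rev.reverse

def format_paris_name_alt (paris_name : String) : String :=
  let stripped := PySem.Chars.strip paris_name.toList
  if stripped = [] then ""
  else
    let parts := PySem.Chars.split₀ stripped
    if parts.length < 2 then String.ofList (pvTitle stripped)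
    else String.ofList (pvGo stripped parts [])

-- ===== PRECONDITION & SPEC =====
def Spec_format_paris_name (paris_name : String) (out : String) : Prop := out = format_paris_name_alt paris_name
instance (paris_name : String) (out : String) : Decidable (Spec_format_paris_name paris_name out) := by unfold Spec_format_paris_name; infer_instance

-- ===== CLAIM (what is proved, stated in full; the proofs are below) =====
def Claim_equal_format_paris_name : Prop := ∀ (paris_name : String), Dom_format_paris_name paris_name → Spec_format_paris_name paris_name (format_paris_name paris_name)

-- ===== LEMMAS AND PROOFS =====

-- abbreviations for the proofs (not used by the ports)
def pvStep (st : List (List Char) × List (List Char) × Bool) (part : List Char) :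
    List (List Char) × List (List Char) × Bool :=
  if !st.2.2 && pvIsLastnamePart part then
    if pvParticles.contains (PySem.Chars.lower part) then
      (st.1 ++ [PySem.Chars.lower part], st.2.1, st.2.2)
    else
      (st.1 ++ [pvTitle part], st.2.1, st.2.2)
  else (st.1, st.2.1 ++ [part], true)

-- once the latch is set, A's loop only appends to firstname_parts
theorem pvFold_found (l : List (List Char)) (ln fn : List (List Char)) :
    l.foldl pvStep (ln, fn, true) = (ln, fn ++ l, true) := by
  induction l generalizing fn with
  | nil => simp
  | cons h t ih => simp [pvStep, ih]

-- A's latched loop computes takeWhile/dropWhile of the lastname predicate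
theorem pvFold_eq (l : List (List Char)) (ln : List (List Char)) :
    l.foldl pvStep (ln, [], false) =
      (ln ++ (l.takeWhile pvIsLastnamePart).map pvTransform,
       l.dropWhile pvIsLastnamePart,
       !(l.dropWhile pvIsLastnamePart).isEmpty) := by
  induction l generalizing ln with
  | nil => simp
  | cons h t ih =>
    by_cases hP : pvIsLastnamePart h
    · have hstep : pvStep (ln, [], false) h = (ln ++ [pvTransform h], [], false) := by
        simp [pvStep, pvTransform, hP]
        split <;> simp
      simp only [List.foldl_cons, hstep, ih, List.takeWhile_cons, List.dropWhile_cons, hP]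
      simp
    · have hstep : pvStep (ln, [], false) h = (ln, [h], true) := by
        simp [pvStep, hP]
      simp only [List.foldl_cons, hstep, pvFold_found, List.takeWhile_cons,
        List.dropWhile_cons, hP]
      simp

-- pvTitle preserves length
theorem pvTitle_length (cs : List Char) : (pvTitle cs).length = cs.length := by
  have h : ∀ (l : List Char) (acc : List Char) (b : Bool),
      ((l.foldl (fun (st : List Char × Bool) c =>
        (st.1 ++ [if st.2 then PySem.Chars.lowerChar c else PySem.Chars.upperChar c],
         PySem.Chars.isalpha c)) (acc, b)).1).length = acc.length + l.length := by
    intro l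
    induction l with
    | nil => intro acc b; simp
    | cons c t ih => intro acc b; simp [List.foldl_cons, ih]; omega
  simpa [pvTitle] using h cs [] false

-- a part accepted by the predicate is nonempty, so its transform is nonempty
theorem pvTransform_ne_nil (p : List Char) (h : pvIsLastnamePart p = true) :
    pvTransform p ≠ [] := by
  unfold pvTransform
  by_cases hc : pvParticles.contains (PySem.Chars.lower p)
  · simp only [hc, if_true]
    have hm : PySem.Chars.lower p ∈ pvParticles := by simpa using hc
    simp only [pvParticles, List.mem_cons, List.not_mem_nil, or_false] at hm
    rcases hm with h1|h1|h1|h1|h1|h1|h1|h1|h1|h1 <;> simp [h1]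
  · rw [if_neg (by simpa using hc)]
    have hp : p ≠ [] := by rintro rfl; exact absurd h (by decide)
    intro he
    have hlen : p.length = 0 := by rw [← pvTitle_length p, he]; rfl
    exact hp (List.length_eq_zero_iff.mp hlen)

-- join with nonempty pieces is empty only for the empty list
theorem pvJoin_ne_nil (l : List (List Char)) (hne : l ≠ [])
    (h : ∀ x ∈ l, x ≠ []) : PySem.Chars.join [' '] l ≠ [] := by
  match l with
  | [] => exact absurd rfl hne
  | [x] => rw [PySem.Chars.join_singleton]; exact h x (by simp)
  | a :: b :: t =>
    rw [PySem.Chars.join_cons_cons]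
    simp

-- B's recursion, characterised by takeWhile/dropWhile
theorem pvGo_eq (stripped : List Char) (l acc : List (List Char)) :
    pvGo stripped l acc =
      (let lr := ((l.takeWhile pvIsLastnamePart).map pvTransform).reverse ++ acc
       if l.dropWhile pvIsLastnamePart = [] then
         if 2 ≤ lr.length then
           lr.headD [] ++ [' '] ++ PySem.Chars.join [' '] ((lr.drop 1).reverse)
         else stripped
       else
         if lr = [] then PySem.Chars.join [' '] (l.dropWhile pvIsLastnamePart)
         else PySem.Chars.join [' '] (l.dropWhile pvIsLastnamePart) ++ [' '] ++
           PySem.Chars.join [' '] lr.reverse) := by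
  induction l generalizing acc with
  | nil => simp [pvGo]
  | cons h t ih =>
    by_cases hP : pvIsLastnamePart h
    · simp only [pvGo, hP, if_true, ih, List.takeWhile_cons, List.dropWhile_cons, List.map_cons,
        List.reverse_cons, List.append_assoc, List.singleton_append]
    · simp [pvGo, hP]

-- ===== VERDICT (by name: the statement is the Claim_ definition above) =====
-- reversing then dropping the head drops the last element
theorem pvRevTail {α : Type} (l : List α) : l.reverse.tail.reverse = l.dropLast := by
  induction l using List.reverseRecOn with
  | nil => rfl
  | append_singleton xs x _ => simp

-- ===== VERDICT (by name: the statement is the Claim_ definition above) =====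
theorem format_paris_name_spec : Claim_equal_format_paris_name := by
  intro paris_name _
  unfold Spec_format_paris_name format_paris_name format_paris_name_alt
  by_cases hs : PySem.Chars.strip paris_name.toList = []
  · simp [hs]
  · have hne : ¬ paris_name.toList = [] := by
      intro h; apply hs; rw [h]; rfl
    simp only [hne, hs, or_self, if_false]
    set stripped := PySem.Chars.strip paris_name.toList with hstr
    set parts := PySem.Chars.split₀ stripped with hparts
    by_cases hlen : parts.length < 2
    · simp [hlen]
    · simp only [hlen, if_false]
      have hstep : (fun (st : List (List Char) × List (List Char) × Bool) part =>
          if !st.2.2 && pvIsLastnamePart part then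
            if pvParticles.contains (PySem.Chars.lower part) then
              (st.1 ++ [PySem.Chars.lower part], st.2.1, st.2.2)
            else (st.1 ++ [pvTitle part], st.2.1, st.2.2)
          else (st.1, st.2.1 ++ [part], true)) = pvStep := rfl
      simp only [hstep, pvFold_eq, pvGo_eq, List.nil_append, List.append_nil]
      set L := (parts.takeWhile pvIsLastnamePart).map pvTransform with hL
      set dw := parts.dropWhile pvIsLastnamePart with hdw
      by_cases hdwe : dw = []
      · -- all parts are lastname parts
        simp only [hdwe, if_true, List.length_reverse]
        by_cases h2 : 2 ≤ L.length
        · simp only [h2, if_true]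
          rw [PySem.List.pyGet?_neg_one, PySem.List.slice_to_neg_one, List.drop_one,
            pvRevTail, List.getLast?_eq_head?_reverse]
          cases L.reverse <;> rfl
        · simp [h2]
      · -- a firstname exists
        simp only [hdwe, if_false]
        have hLnil : (PySem.Chars.join [' '] L = []) ↔ (L.reverse = []) := by
          constructor
          · intro hj
            by_contra hLr
            have hLne : L ≠ [] := by
              intro h0; exact hLr (by simp [h0])
            refine pvJoin_ne_nil L hLne ?_ hj
            intro x hx
            rw [hL] at hx
            rcases List.mem_map.mp hx with ⟨y, hy, rfl⟩
            exact pvTransform_ne_nil y (List.mem_takeWhile_imp hy)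
          · intro h0
            have : L = [] := by simpa using h0
            simp [this, PySem.Chars.join_nil]
        by_cases hLe : L.reverse = []
        · simp only [hLe, if_true, hLnil.mpr hLe, if_true]
        · simp only [hLe, if_false]
          have : ¬ (PySem.Chars.join [' '] L = []) := fun hj => hLe (hLnil.mp hj)
          simp only [this, if_false, List.reverse_reverse]
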